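-- pv_equiv track=rewrite | github.com/0choki0/algo | 프로그래머스/0/181829. 이차원 배열 대각선 순회하기/이차원 배열 대각선 순회하기.py | solution
-- ===== SOURCE A (Python) =====
-- def solution(board, k):
--     answer = 0
--     i = 0
--     for row in board:
--
--         j = 0
--         for col in row:
--             if i + j <= k:
--                 answer += board[i][j]
--             j += 1
--         i += 1
--
--     return answer
-- ===== SOURCE B (Python) =====
-- def solution(board, k):
--     if not board:
--         return 0
--     n = len(board)
--     top = min(k, n - 2 + max(len(row) for row in board))
--     answer = 0
--     for d in range(top + 1):
--         for i in range(n):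
--             j = d - i
--             if 0 <= j < len(board[i]):
--                 answer += board[i][j]
--     return answer
-- ===== Notes on version B (the rewrite author's own statement) =====
-- stated objective: alternative
-- what changed: B traverses the board by anti-diagonals d = i+j from 0 to min(k, max diagonal), summing board[i][d-i] with bounds checks, instead of A's row-by-row scan testing i+j<=k on every cell.
import Mathlib
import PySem

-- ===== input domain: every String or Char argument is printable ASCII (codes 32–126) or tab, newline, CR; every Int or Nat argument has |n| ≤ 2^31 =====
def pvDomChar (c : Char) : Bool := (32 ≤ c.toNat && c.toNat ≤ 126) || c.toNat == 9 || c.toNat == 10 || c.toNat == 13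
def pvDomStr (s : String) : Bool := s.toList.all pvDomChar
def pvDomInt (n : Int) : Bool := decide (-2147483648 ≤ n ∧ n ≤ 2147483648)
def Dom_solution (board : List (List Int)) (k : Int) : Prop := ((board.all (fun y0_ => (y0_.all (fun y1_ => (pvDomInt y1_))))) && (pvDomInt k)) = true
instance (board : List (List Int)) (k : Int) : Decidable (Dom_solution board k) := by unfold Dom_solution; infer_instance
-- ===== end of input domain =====

-- B sums the same cells by sweeping anti-diagonals d = i + j (bounded by the board shape) instead of A's row scan; no speed claim.

-- ===== PORT A =====
-- A's inner loop body: 'if i + j <= k: answer += board[i][j]; j += 1'.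
-- board[i][j] is ported with pyGet?; i and j always index existing cells here, so the .getD 0 default is never taken.
def innerF (board : List (List Int)) (k i : Int) : Int × Int → Int → Int × Int :=
  fun st2 _col =>
    (if i + st2.2 ≤ k then
       st2.1 + (((PySem.List.pyGet? board i).bind (fun r => PySem.List.pyGet? r st2.2)).getD 0)
     else st2.1,
     st2.2 + 1)

-- A's outer loop body: run the inner loop with j = 0, then i += 1.
def outerF (board : List (List Int)) (k : Int) : Int × Int → List Int → Int × Int :=
  fun st row => ((row.foldl (innerF board k st.2) (st.1, 0)).1, st.2 + 1)

def solution (board : List (List Int)) (k : Int) : Int :=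
  (board.foldl (outerF board k) (0, 0)).1

-- ===== PORT B =====
-- B's inner loop body: 'j = d - i; if 0 <= j < len(board[i]): answer += board[i][j]'
-- (i always indexes an existing row here, so the .getD [] / .getD 0 defaults are never taken).
def diagF (board : List (List Int)) (d : Int) : Int → Int → Int :=
  fun answer i =>
    let j := d - i
    let row := (PySem.List.pyGet? board i).getD []
    if 0 ≤ j ∧ j < (row.length : Int) then answer + (PySem.List.pyGet? row j).getD 0
    else answer

def solution_alt (board : List (List Int)) (k : Int) : Int :=
  if board = [] then 0
  else
    match PySem.List.max? (board.map (fun r => (r.length : Int))) (fun y => y) with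
    | none => 0  -- unreachable: board ≠ []
    | some m =>
      let top := min k ((board.length : Int) - 2 + m)
      (PySem.List.pyRange 0 (top + 1) 1).foldl
        (fun answer d =>
          (PySem.List.pyRange 0 (board.length : Int) 1).foldl (diagF board d) answer)
        0

-- ===== PRECONDITION & SPEC =====
def Spec_solution (board : List (List Int)) (k : Int) (out : Int) : Prop := out = solution_alt board k
instance (board : List (List Int)) (k : Int) (out : Int) : Decidable (Spec_solution board k out) := by unfold Spec_solution; infer_instance

-- ===== CLAIM (what is proved, stated in full; the proofs are below) =====
def Claim_equal_solution : Prop := ∀ (board : List (List Int)) (k : Int), Dom_solution board k → Spec_solution board k (solution board k)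

-- ===== LEMMAS AND PROOFS =====

-- Reference value: the sum of all cells board[i][j] with i + j ≤ k.
def rowSum (k : Int) (i : ℕ) (row : List Int) : Int :=
  ∑ j ∈ Finset.range row.length, if (i : Int) + (j : Int) ≤ k then row.getD j 0 else 0

def total (board : List (List Int)) (k : Int) : Int :=
  ∑ i ∈ Finset.range board.length, rowSum k i (board.getD i [])

lemma sum_list_range (n : ℕ) (f : ℕ → Int) :
    ((List.range n).map f).sum = ∑ t ∈ Finset.range n, f t := by
  induction n with
  | zero => simp
  | succ n ih => simp [List.range_succ, Finset.sum_range_succ, ih]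

-- A's inner loop, iterating over the suffix 'rest' of the current row 'full = pre ++ rest'.
lemma innerA (board : List (List Int)) (k i : Int) (full pre rest : List Int)
    (hrow : PySem.List.pyGet? board i = some full) (hfull : full = pre ++ rest) (acc : Int) :
    (rest.foldl (innerF board k i) (acc, (pre.length : Int))).1
      = acc + ∑ t ∈ Finset.range rest.length,
          (if i + ((pre.length : Int) + (t : Int)) ≤ k then rest.getD t 0 else 0) := by
  induction rest generalizing pre acc with
  | nil => simp
  | cons c rest ih =>
    have hval : ((PySem.List.pyGet? board i).bind fun a => a[pre.length]?).getD 0 = c := by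
      rw [hrow]
      simp only [Option.bind_some]
      rw [hfull]
      simp
    have hstep : (c :: rest).foldl (innerF board k i) (acc, (pre.length : Int))
        = rest.foldl (innerF board k i)
            ((if i + (pre.length : Int) ≤ k then acc + c else acc), ((pre ++ [c]).length : Int)) := by
      simp [innerF, hval, apply_ite (fun a => (a, (pre.length : Int) + 1))]
    rw [hstep, ih (pre ++ [c]) (by simpa using hfull)]
    have hlen : (((pre ++ [c]).length : ℕ) : Int) = (pre.length : Int) + 1 := by
      simp
    rw [hlen]
    rw [show ((c :: rest).length) = rest.length + 1 from rfl, Finset.sum_range_succ']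
    have hsum : ∀ t ∈ Finset.range rest.length,
        (if i + (((pre.length : Int) + 1) + (t : Int)) ≤ k then rest.getD t 0 else 0)
          = (if i + ((pre.length : Int) + (((t : ℕ) + 1 : ℕ) : Int)) ≤ k then (c :: rest).getD (t + 1) 0 else 0) := by
      intro t _
      have h : i + (((pre.length : Int) + 1) + (t : Int)) = i + ((pre.length : Int) + (((t : ℕ) + 1 : ℕ) : Int)) := by
        push_cast; ring
      rw [h]
      rfl
    rw [Finset.sum_congr rfl hsum]
    simp only [Nat.cast_zero, add_zero, List.getD_cons_zero]
    split_ifs <;> ring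

-- A's outer loop, iterating over the suffix 'rest' of 'board = pre ++ rest'.
lemma outerA (k : Int) (board pre rest : List (List Int)) (hb : board = pre ++ rest) (acc : Int) :
    (rest.foldl (outerF board k) (acc, (pre.length : Int))).1
      = acc + ∑ t ∈ Finset.range rest.length, rowSum k (pre.length + t) (rest.getD t []) := by
  induction rest generalizing pre acc with
  | nil => simp
  | cons row rest ih =>
    have hrow : PySem.List.pyGet? board (pre.length : Int) = some row := by
      rw [hb]; exact PySem.List.pyGet?_append_length pre rest row
    have hinner := innerA board k (pre.length : Int) row [] row hrow rfl acc
    have hstep : (row :: rest).foldl (outerF board k) (acc, (pre.length : Int))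
        = rest.foldl (outerF board k)
            ((row.foldl (innerF board k (pre.length : Int)) (acc, 0)).1, ((pre ++ [row]).length : Int)) := by
      simp [outerF]
    rw [hstep]
    have h1 : (row.foldl (innerF board k (pre.length : Int)) (acc, 0)).1
        = acc + rowSum k pre.length row := by
      simpa [rowSum] using hinner
    rw [h1, ih (pre ++ [row]) (by simpa using hb)]
    rw [show ((row :: rest).length) = rest.length + 1 from rfl, Finset.sum_range_succ']
    have hsum : ∀ t ∈ Finset.range rest.length,
        rowSum k ((pre ++ [row]).length + t) (rest.getD t [])
          = rowSum k (pre.length + (t + 1)) ((row :: rest).getD (t + 1) []) := by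
      intro t _
      have h : (pre ++ [row]).length + t = pre.length + (t + 1) := by simp; omega
      rw [h]
      rfl
    rw [Finset.sum_congr rfl hsum]
    simp only [add_zero, List.getD_cons_zero]
    ring


lemma A_eq (board : List (List Int)) (k : Int) : solution board k = total board k := by
  have h := outerA k board [] board rfl 0
  simpa [solution, total] using h

-- pure ℕ reindexing: summing over d and picking j = d - i equals summing over j with d = i + j.
lemma sum_shift (T i L : ℕ) (v : ℕ → Int) :
    (∑ d ∈ Finset.range T, if i ≤ d ∧ d - i < L then v (d - i) else 0)
      = ∑ j ∈ Finset.range L, if i + j < T then v j else 0 := by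
  induction T with
  | zero => simp
  | succ T ih =>
    rw [Finset.sum_range_succ, ih]
    have hsplit : ∀ j ∈ Finset.range L,
        (if i + j < T + 1 then v j else 0)
          = (if i + j < T then v j else 0) + (if i + j = T then v j else 0) := by
      intro j _
      by_cases h1 : i + j < T
      · rw [if_pos (by omega), if_pos h1, if_neg (by omega), add_zero]
      · by_cases h2 : i + j = T
        · rw [if_pos (by omega), if_neg h1, if_pos h2, zero_add]
        · rw [if_neg (by omega), if_neg h1, if_neg h2, add_zero]
    rw [Finset.sum_congr rfl hsplit, Finset.sum_add_distrib]
    congr 1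
    have heq : ∀ j ∈ Finset.range L,
        (if i + j = T then v j else 0) = (if j = T - i ∧ i ≤ T then v j else 0) := by
      intro j _
      by_cases h : i + j = T
      · rw [if_pos h, if_pos (by omega)]
      · rw [if_neg h, if_neg (by omega)]
    rw [Finset.sum_congr rfl heq]
    by_cases hle : i ≤ T
    · simp only [hle, and_true]
      rw [Finset.sum_ite_eq' (Finset.range L) (T - i) v]
      simp [Finset.mem_range]
    · have h1 : (if i ≤ T ∧ T - i < L then v (T - i) else 0) = 0 := if_neg (by omega)
      have h2 : ∀ j ∈ Finset.range L, (if j = T - i ∧ i ≤ T then v j else 0) = 0 := by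
        intro j _
        exact if_neg (by omega)
      rw [h1, Finset.sum_congr rfl h2, Finset.sum_const_zero]

-- the contribution of index i to diagonal d
def term (board : List (List Int)) (d i : Int) : Int :=
  if 0 ≤ d - i ∧ d - i < (((PySem.List.pyGet? board i).getD []).length : Int) then
    (PySem.List.pyGet? ((PySem.List.pyGet? board i).getD []) (d - i)).getD 0
  else 0

lemma diagF_add (board : List (List Int)) (d : Int) :
    diagF board d = fun answer i => answer + term board d i := by
  funext answer i
  simp only [diagF, term]
  split_ifs <;> simp

lemma sum_map_pyRange (N : Int) (f : Int → Int) :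
    ((PySem.List.pyRange 0 N 1).map f).sum = ∑ t ∈ Finset.range N.toNat, f (t : Int) := by
  rw [PySem.List.pyRange_one, List.map_map]
  have : N - 0 = N := by ring
  rw [this]
  rw [sum_list_range N.toNat (f ∘ fun t => (0 : Int) + (t : Int))]
  exact Finset.sum_congr rfl (fun t _ => by simp)

lemma diagRowSum (k : Int) (row : List Int) (i n T : ℕ) (m : Int)
    (hin : i < n) (hLm : (row.length : Int) ≤ m)
    (hT : T = (min k ((n : Int) - 2 + m) + 1).toNat) :
    (∑ d ∈ Finset.range T,
      if 0 ≤ (d : Int) - (i : Int) ∧ (d : Int) - (i : Int) < (row.length : Int) then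
        (PySem.List.pyGet? row ((d : Int) - (i : Int))).getD 0
      else 0)
      = rowSum k i row := by
  have h1 : ∀ d ∈ Finset.range T,
      (if 0 ≤ (d : Int) - (i : Int) ∧ (d : Int) - (i : Int) < (row.length : Int) then
        (PySem.List.pyGet? row ((d : Int) - (i : Int))).getD 0 else 0)
      = (if i ≤ d ∧ d - i < row.length then row.getD (d - i) 0 else 0) := by
    intro d _
    by_cases h : i ≤ d ∧ d - i < row.length
    · rw [if_pos (by omega), if_pos h]
      have hcast : (d : Int) - (i : Int) = ((d - i : ℕ) : Int) := by omega
      rw [hcast, PySem.List.pyGet?_natCast]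
      rw [List.getD_eq_getElem?_getD]
    · rw [if_neg (by omega), if_neg h]
  rw [Finset.sum_congr rfl h1, sum_shift T i row.length (fun t => row.getD t 0)]
  unfold rowSum
  refine Finset.sum_congr rfl (fun j hj => ?_)
  have hjL : j < row.length := Finset.mem_range.mp hj
  by_cases h : (i : Int) + (j : Int) ≤ k
  · rw [if_pos (by omega), if_pos h]
  · rw [if_neg (by omega), if_neg h]

lemma B_eq (board : List (List Int)) (k : Int) : solution_alt board k = total board k := by
  by_cases hne : board = []
  · subst hne; simp [solution_alt, total]
  · obtain ⟨m, hm⟩ : ∃ m, PySem.List.max? (board.map (fun r => (r.length : Int))) (fun y => y) = some m := by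
      rcases h : PySem.List.max? (board.map (fun r => (r.length : Int))) (fun y => y) with _ | m
      · rw [PySem.List.max?_eq_none_iff] at h
        exact absurd h (by simpa using hne)
      · exact ⟨m, h⟩
    have hmax : ∀ i, i < board.length → ((board.getD i []).length : Int) ≤ m := by
      intro i hi
      have hmem : ((board.getD i []).length : Int) ∈ board.map (fun r => (r.length : Int)) := by
        rw [List.getD_eq_getElem board [] hi]
        exact List.mem_map.mpr ⟨board[i], List.getElem_mem hi, rfl⟩
      simpa using PySem.List.max?_isMax hm _ hmem
    unfold solution_alt
    rw [if_neg hne, hm]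
    simp only
    have hinner : (fun (answer d : Int) =>
          (PySem.List.pyRange 0 ((board.length : ℕ) : Int) 1).foldl (diagF board d) answer)
        = fun answer d => answer +
            ((PySem.List.pyRange 0 ((board.length : ℕ) : Int) 1).map (term board d)).sum := by
      funext answer d
      rw [diagF_add]
      exact PySem.List.foldl_add _ _ _
    rw [hinner, PySem.List.foldl_add, zero_add, sum_map_pyRange]
    have hinner2 : ∀ t ∈ Finset.range (min k ((board.length : Int) - 2 + m) + 1).toNat,
        ((PySem.List.pyRange 0 ((board.length : ℕ) : Int) 1).map (term board (t : Int))).sum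
          = ∑ x ∈ Finset.range board.length, term board (t : Int) (x : Int) := by
      intro t _
      rw [sum_map_pyRange]
      simp
    rw [Finset.sum_congr rfl hinner2, Finset.sum_comm]
    unfold total
    refine Finset.sum_congr rfl (fun i hi => ?_)
    have hiL : i < board.length := Finset.mem_range.mp hi
    have hterm : ∀ d ∈ Finset.range (min k ((board.length : Int) - 2 + m) + 1).toNat,
        term board (d : Int) (i : Int)
          = (if 0 ≤ (d : Int) - (i : Int) ∧
                (d : Int) - (i : Int) < ((board.getD i []).length : Int) then
              (PySem.List.pyGet? (board.getD i []) ((d : Int) - (i : Int))).getD 0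
            else 0) := by
      intro d _
      simp only [term, PySem.List.pyGet?_natCast, ← List.getD_eq_getElem?_getD]
    rw [Finset.sum_congr rfl hterm]
    exact diagRowSum k (board.getD i []) i board.length _ m hiL (hmax i hiL) rfl

-- ===== VERDICT (by name: the statement is the Claim_ definition above) =====
theorem solution_spec : Claim_equal_solution := by
  intro board k _
  unfold Spec_solution
  rw [A_eq, B_eq]
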